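-- pv_equiv track=rewrite | github.com/ioannis-papag/papageorgiou-uva-thesis-2024 | code/create_predicates/create_predicates.py | extract_all_predicates
-- ===== SOURCE A (Python) =====
-- def extract_all_predicates(objects, literals):
--     move_dirs = []
--     is_nongoals = []
--     clears = []
--     is_stones = []
--     ats = []
--     is_players = []
--     at_goals = []
--     moves = []
--     is_goals = []
--
--     for object_1 in objects:
--         is_nongoals.append('is-nongoal(' + object_1 + ')')
--         clears.append('clear(' + object_1 + ')')
--         is_stones.append('is-stone(' + object_1 + ')')
--         is_players.append('is-player(' + object_1 + ')')
--         at_goals.append('at-goal(' + object_1 + ')')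
--         is_goals.append('is-goal(' + object_1 + ')')
--         moves.append('move(' + object_1 + ')')
--         for object_2 in objects:
--             ats.append('at(' + object_1 + ',' + object_2 + ')')
--             for object_3 in objects:
--                 move_dirs.append('move-dir(' + object_1 + ',' + object_2 + ',' + object_3 + ')')
--
--     all_predicates = move_dirs + is_nongoals + clears + is_stones + ats + is_players + at_goals + moves + is_goals
--     predicate_labels = [0 for item in all_predicates]
--
--     literals_list = list(literals)
--     literals_string_list = []
--     for lit in literals_list:
--         literals_string_list.append(str(lit))
--     for i, predicate in enumerate(all_predicates):
--         if predicate in literals_string_list: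
--             predicate_labels[i] = 1
--
--
--     return all_predicates, predicate_labels
-- ===== SOURCE B (Python) =====
-- def extract_all_predicates(objects, literals):
--     move_dirs = ['move-dir(' + a + ',' + b + ',' + c + ')'
--                  for a in objects for b in objects for c in objects]
--     is_nongoals = ['is-nongoal(' + o + ')' for o in objects]
--     clears = ['clear(' + o + ')' for o in objects]
--     is_stones = ['is-stone(' + o + ')' for o in objects]
--     ats = ['at(' + a + ',' + b + ')' for a in objects for b in objects]
--     is_players = ['is-player(' + o + ')' for o in objects]
--     at_goals = ['at-goal(' + o + ')' for o in objects]
--     moves = ['move(' + o + ')' for o in objects]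
--     is_goals = ['is-goal(' + o + ')' for o in objects]
--
--     all_predicates = (move_dirs + is_nongoals + clears + is_stones + ats
--                       + is_players + at_goals + moves + is_goals)
--
--     index = {}
--     for i, predicate in enumerate(all_predicates):
--         index.setdefault(predicate, []).append(i)
--
--     predicate_labels = [0] * len(all_predicates)
--     for lit in literals:
--         for i in index.get(str(lit), []):
--             predicate_labels[i] = 1
--
--     return all_predicates, predicate_labels
-- ===== Notes on version B (the rewrite author's own statement) =====
-- stated objective: alternative
-- what changed: Labels are assigned by iterating over the literals and scattering through a prebuilt predicate->positions index instead of scanning the literals list once per predicate, and the predicate families are built with comprehensions instead of nine append accumulators in one loop; total cost stays dominated by the O(n^3) predicate generation.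
import Mathlib
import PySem

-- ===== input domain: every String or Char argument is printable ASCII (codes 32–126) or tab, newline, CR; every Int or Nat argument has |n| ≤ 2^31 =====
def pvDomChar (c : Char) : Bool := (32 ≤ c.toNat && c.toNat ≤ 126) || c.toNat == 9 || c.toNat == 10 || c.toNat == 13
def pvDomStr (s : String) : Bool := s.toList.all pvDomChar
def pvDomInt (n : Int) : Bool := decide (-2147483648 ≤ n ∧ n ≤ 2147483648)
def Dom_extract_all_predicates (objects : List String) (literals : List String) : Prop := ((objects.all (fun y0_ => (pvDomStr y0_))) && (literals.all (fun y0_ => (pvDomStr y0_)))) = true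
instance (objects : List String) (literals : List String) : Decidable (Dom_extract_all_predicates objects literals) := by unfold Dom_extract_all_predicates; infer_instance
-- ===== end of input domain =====

-- B labels by iterating over the literals and scattering through a prebuilt predicate->positions
-- index instead of scanning the literals list once per predicate, and builds the predicate
-- families by comprehensions instead of nine append accumulators (alternative structure).

-- ===== PORT A =====
-- one loop over objects appending into nine accumulator lists (inner loops over the full objects list)
def extract_all_predicates (objects : List String) (literals : List String) : List String × List Int :=
  let st := objects.foldl
    (fun (st : List String × List String × List String × List String × List String ×
               List String × List String × List String × List String) o1 =>
      let (md, ng, cl, isS, ats, pl, ag, mv, gl) := st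
      let ng := ng ++ ["is-nongoal(" ++ o1 ++ ")"]
      let cl := cl ++ ["clear(" ++ o1 ++ ")"]
      let isS := isS ++ ["is-stone(" ++ o1 ++ ")"]
      let pl := pl ++ ["is-player(" ++ o1 ++ ")"]
      let ag := ag ++ ["at-goal(" ++ o1 ++ ")"]
      let gl := gl ++ ["is-goal(" ++ o1 ++ ")"]
      let mv := mv ++ ["move(" ++ o1 ++ ")"]
      let inner := objects.foldl
        (fun (q : List String × List String) o2 =>
          (q.1 ++ ["at(" ++ o1 ++ "," ++ o2 ++ ")"],
           objects.foldl (fun md o3 => md ++ ["move-dir(" ++ o1 ++ "," ++ o2 ++ "," ++ o3 ++ ")"]) q.2))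
        (ats, md)
      (inner.2, ng, cl, isS, inner.1, pl, ag, mv, gl))
    ([], [], [], [], [], [], [], [], [])
  let all := st.1 ++ st.2.1 ++ st.2.2.1 ++ st.2.2.2.1 ++ st.2.2.2.2.1 ++ st.2.2.2.2.2.1 ++
             st.2.2.2.2.2.2.1 ++ st.2.2.2.2.2.2.2.1 ++ st.2.2.2.2.2.2.2.2
  let labels0 : List Int := all.map (fun _ => 0)
  -- literals_string_list: str(lit) of a string is the string itself
  let lss := literals.foldl (fun acc lit => acc ++ [lit]) []
  let labels := (PySem.List.enumerate all 0).foldl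
    (fun lab (ip : Int × String) => if lss.contains ip.2 then lab.set ip.1.toNat 1 else lab) labels0
  (all, labels)

-- ===== PORT B =====
def extract_all_predicates_alt (objects : List String) (literals : List String) : List String × List Int :=
  let move_dirs := objects.flatMap (fun a => objects.flatMap (fun b =>
      objects.map (fun c => "move-dir(" ++ a ++ "," ++ b ++ "," ++ c ++ ")")))
  let is_nongoals := objects.map (fun o => "is-nongoal(" ++ o ++ ")")
  let clears := objects.map (fun o => "clear(" ++ o ++ ")")
  let is_stones := objects.map (fun o => "is-stone(" ++ o ++ ")")
  let ats := objects.flatMap (fun a => objects.map (fun b => "at(" ++ a ++ "," ++ b ++ ")"))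
  let is_players := objects.map (fun o => "is-player(" ++ o ++ ")")
  let at_goals := objects.map (fun o => "at-goal(" ++ o ++ ")")
  let moves := objects.map (fun o => "move(" ++ o ++ ")")
  let is_goals := objects.map (fun o => "is-goal(" ++ o ++ ")")
  let all := move_dirs ++ is_nongoals ++ clears ++ is_stones ++ ats ++ is_players ++ at_goals ++ moves ++ is_goals
  -- index.setdefault(p, []).append(i)  ==  index[p] = index.get(p, []) + [i]
  let index : PySem.Dict String (List Int) :=
    (PySem.List.enumerate all 0).foldl (fun d ip => d.modify ip.2 [] (fun l => l ++ [ip.1])) PySem.Dict.empty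
  let labels := literals.foldl
    (fun lab lit => (index.getD lit []).foldl (fun lab (i : Int) => lab.set i.toNat 1) lab)
    (all.map (fun _ => (0 : Int)))
  (all, labels)

-- ===== PRECONDITION & SPEC =====
def Spec_extract_all_predicates (objects : List String) (literals : List String) (out : List String × List Int) : Prop := out = extract_all_predicates_alt objects literals
instance (objects : List String) (literals : List String) (out : List String × List Int) : Decidable (Spec_extract_all_predicates objects literals out) := by unfold Spec_extract_all_predicates; infer_instance

-- ===== CLAIM (what is proved, stated in full; the proofs are below) =====
def Claim_equal_extract_all_predicates : Prop := ∀ (objects : List String) (literals : List String), Dom_extract_all_predicates objects literals → Spec_extract_all_predicates objects literals (extract_all_predicates objects literals)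

-- ===== LEMMAS AND PROOFS =====

-- positions (as Python ints) of s in ps, counting from k
def pvPosF (k : Nat) (ps : List String) (s : String) : List Int :=
  match ps with
  | [] => []
  | p :: t => if p == s then (k : Int) :: pvPosF (k + 1) t s else pvPosF (k + 1) t s

theorem pvPosF_eq (s : String) : ∀ (ps : List String) (k : Nat),
    (((PySem.List.enumerate ps (k : Int)).map Prod.swap).filter (fun q => q.1 == s)).map (·.2)
      = pvPosF k ps s := by
  intro ps
  induction ps with
  | nil => intro k; simp [pvPosF, PySem.List.enumerate_nil]
  | cons p t ih =>
    intro k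
    rw [PySem.List.enumerate_cons]
    have hk1 : ((k : Int) + 1) = ((k + 1 : Nat) : Int) := by push_cast; ring
    by_cases h : p == s
    · simp only [List.map_cons, List.filter_cons, Prod.swap, h, if_pos]
      simp only [pvPosF, h, if_pos]
      rw [hk1, ih (k + 1)]
    · simp only [List.map_cons, List.filter_cons, Prod.swap, h]
      simp only [pvPosF, h, Bool.false_eq_true, if_false]
      rw [hk1, ih (k + 1)]

theorem pv_scatter (s : String) : ∀ (ps : List String) (k : Nat) (done : List Int),
    done.length = k → ∀ (g : String → Int),
    (pvPosF k ps s).foldl (fun lab (i : Int) => lab.set i.toNat 1) (done ++ ps.map g)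
      = done ++ ps.map (fun p => if p == s then 1 else g p) := by
  intro ps
  induction ps with
  | nil => intro k done hk g; simp [pvPosF]
  | cons p t ih =>
    intro k done hk g
    by_cases h : p == s
    · simp only [pvPosF, h, if_pos, List.map_cons, List.foldl_cons]
      have hset : (done ++ g p :: t.map g).set (k : Int).toNat 1 = (done ++ [(1 : Int)]) ++ t.map g := by
        rw [Int.toNat_natCast, ← hk, List.set_append_right _ _ (le_refl _)]
        simp
      rw [hset, ih (k + 1) (done ++ [1]) (by simp [hk]) g]
      simp
    · simp only [pvPosF, h, Bool.false_eq_true, if_false, List.map_cons]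
      have hsplit : done ++ g p :: t.map g = (done ++ [g p]) ++ t.map g := by simp
      rw [hsplit, ih (k + 1) (done ++ [g p]) (by simp [hk]) g]
      simp

theorem pv_enum_set (lss : List String) : ∀ (ps : List String) (k : Nat) (done : List Int),
    done.length = k →
    (PySem.List.enumerate ps (k : Int)).foldl
        (fun lab (ip : Int × String) => if lss.contains ip.2 then lab.set ip.1.toNat 1 else lab)
        (done ++ ps.map (fun _ => 0))
      = done ++ ps.map (fun p => if lss.contains p then 1 else 0) := by
  intro ps
  induction ps with
  | nil => intro k done hk; simp [PySem.List.enumerate_nil]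
  | cons p t ih =>
    intro k done hk
    rw [PySem.List.enumerate_cons]
    simp only [List.map_cons, List.foldl_cons]
    have hk1 : ((k : Int) + 1) = ((k + 1 : Nat) : Int) := by push_cast; ring
    by_cases h : lss.contains p
    · have hset : (done ++ (0 : Int) :: t.map (fun _ => (0:Int))).set (k : Int).toNat 1
          = (done ++ [(1 : Int)]) ++ t.map (fun _ => (0:Int)) := by
        rw [Int.toNat_natCast, ← hk, List.set_append_right _ _ (le_refl _)]
        simp
      rw [if_pos h, hset, hk1, ih (k + 1) (done ++ [1]) (by simp [hk])]
      have h' : p ∈ lss := by simpa using h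
      simp [h']
    · rw [if_neg (by simpa using h),
        show done ++ (0 : Int) :: t.map (fun _ => (0:Int)) = (done ++ [(0:Int)]) ++ t.map (fun _ => (0:Int)) by simp,
        hk1, ih (k + 1) (done ++ [0]) (by simp [hk])]
      have h' : p ∉ lss := by simpa using h
      simp [h']

theorem pv_lit_fold (all : List String) : ∀ (lits : List String) (g : String → Int),
    lits.foldl (fun lab lit => (pvPosF 0 all lit).foldl (fun lab (i : Int) => lab.set i.toNat 1) lab)
        (all.map g)
      = all.map (fun p => if lits.contains p then 1 else g p) := by
  intro lits
  induction lits with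
  | nil => intro g; simp
  | cons lit rest ih =>
    intro g
    simp only [List.foldl_cons]
    rw [show all.map g = ([] : List Int) ++ all.map g by simp,
        pv_scatter lit all 0 [] rfl g]
    simp only [List.nil_append]
    rw [ih (fun p => if p == lit then 1 else g p)]
    apply List.map_congr_left
    intro p _
    by_cases h1 : p ∈ rest <;> by_cases h2 : p = lit <;>
      simp [h1, h2]

-- the index dict looks up exactly the positions of a predicate
theorem pv_index_getD (all : List String) (s : String) :
    (((PySem.List.enumerate all 0).foldl
        (fun (d : PySem.Dict String (List Int)) (ip : Int × String) => d.modify ip.2 [] (fun l => l ++ [ip.1]))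
        PySem.Dict.empty).getD s [])
      = pvPosF 0 all s := by
  have hfold : (PySem.List.enumerate all 0).foldl
      (fun (d : PySem.Dict String (List Int)) (ip : Int × String) => d.modify ip.2 [] (fun l => l ++ [ip.1])) PySem.Dict.empty
      = ((PySem.List.enumerate all 0).map Prod.swap).foldl
        (fun (d : PySem.Dict String (List Int)) (p : String × Int) => d.modify p.1 [] (fun l => l ++ [p.2])) PySem.Dict.empty := by
    rw [List.foldl_map]
    exact PySem.List.foldl_congr_mem _ _ _ _ (fun d ip _ => by simp)
  rw [hfold, PySem.Dict.getD_foldl_modify_append, PySem.Dict.getD_empty]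
  have := pvPosF_eq s all 0
  simpa using this

-- A's nine-accumulator loop, closed into B's comprehensions
theorem pv_loopA (objects : List String) : ∀ (os : List String)
    (md ng cl isS ats pl ag mv gl : List String),
    os.foldl
      (fun (st : List String × List String × List String × List String × List String ×
                 List String × List String × List String × List String) o1 =>
        let (md, ng, cl, isS, ats, pl, ag, mv, gl) := st
        let ng := ng ++ ["is-nongoal(" ++ o1 ++ ")"]
        let cl := cl ++ ["clear(" ++ o1 ++ ")"]
        let isS := isS ++ ["is-stone(" ++ o1 ++ ")"]
        let pl := pl ++ ["is-player(" ++ o1 ++ ")"]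
        let ag := ag ++ ["at-goal(" ++ o1 ++ ")"]
        let gl := gl ++ ["is-goal(" ++ o1 ++ ")"]
        let mv := mv ++ ["move(" ++ o1 ++ ")"]
        let inner := objects.foldl
          (fun (q : List String × List String) o2 =>
            (q.1 ++ ["at(" ++ o1 ++ "," ++ o2 ++ ")"],
             objects.foldl (fun md o3 => md ++ ["move-dir(" ++ o1 ++ "," ++ o2 ++ "," ++ o3 ++ ")"]) q.2))
          (ats, md)
        (inner.2, ng, cl, isS, inner.1, pl, ag, mv, gl))
      (md, ng, cl, isS, ats, pl, ag, mv, gl)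
    = (md ++ os.flatMap (fun a => objects.flatMap (fun b =>
          objects.map (fun c => "move-dir(" ++ a ++ "," ++ b ++ "," ++ c ++ ")"))),
       ng ++ os.map (fun o => "is-nongoal(" ++ o ++ ")"),
       cl ++ os.map (fun o => "clear(" ++ o ++ ")"),
       isS ++ os.map (fun o => "is-stone(" ++ o ++ ")"),
       ats ++ os.flatMap (fun a => objects.map (fun b => "at(" ++ a ++ "," ++ b ++ ")")),
       pl ++ os.map (fun o => "is-player(" ++ o ++ ")"),
       ag ++ os.map (fun o => "at-goal(" ++ o ++ ")"),
       mv ++ os.map (fun o => "move(" ++ o ++ ")"),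
       gl ++ os.map (fun o => "is-goal(" ++ o ++ ")")) := by
  intro os
  induction os with
  | nil => intro md ng cl isS ats pl ag mv gl; simp
  | cons o1 t ih =>
    intro md ng cl isS ats pl ag mv gl
    simp only [List.foldl_cons]
    have hinner : objects.foldl
        (fun (q : List String × List String) o2 =>
          (q.1 ++ ["at(" ++ o1 ++ "," ++ o2 ++ ")"],
           objects.foldl (fun md o3 => md ++ ["move-dir(" ++ o1 ++ "," ++ o2 ++ "," ++ o3 ++ ")"]) q.2))
        (ats, md)
        = (ats ++ objects.map (fun b => "at(" ++ o1 ++ "," ++ b ++ ")"),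
           md ++ objects.flatMap (fun b =>
             objects.map (fun c => "move-dir(" ++ o1 ++ "," ++ b ++ "," ++ c ++ ")"))) := by
      rw [PySem.List.foldl_prod_mk
            (f := fun (acc : List String) o2 => acc ++ ["at(" ++ o1 ++ "," ++ o2 ++ ")"])
            (g := fun (acc : List String) o2 =>
              objects.foldl (fun md o3 => md ++ ["move-dir(" ++ o1 ++ "," ++ o2 ++ "," ++ o3 ++ ")"]) acc)]
      rw [PySem.List.foldl_append_singleton_eq_map]
      congr 1
      rw [show (fun (acc : List String) o2 =>
            objects.foldl (fun md o3 => md ++ ["move-dir(" ++ o1 ++ "," ++ o2 ++ "," ++ o3 ++ ")"]) acc)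
          = (fun (acc : List String) o2 =>
            acc ++ objects.map (fun o3 => "move-dir(" ++ o1 ++ "," ++ o2 ++ "," ++ o3 ++ ")"))
          from funext fun acc => funext fun o2 =>
            PySem.List.foldl_append_singleton_eq_map _ _ _]
      rw [PySem.List.foldl_append_eq_flatMap]
    simp only [hinner]
    rw [ih]
    simp [List.append_assoc]

-- ===== VERDICT (by name: the statement is the Claim_ definition above) =====
theorem extract_all_predicates_spec : Claim_equal_extract_all_predicates := by
  intro objects literals _
  show extract_all_predicates objects literals = extract_all_predicates_alt objects literals
  simp only [extract_all_predicates, extract_all_predicates_alt]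
  rw [pv_loopA objects objects [] [] [] [] [] [] [] [] []]
  simp only [List.nil_append]
  congr 1
  -- A's label loop
  rw [show literals.foldl (fun acc lit => acc ++ [lit]) ([] : List String) = literals from by
        simpa using PySem.List.foldl_append_singleton_eq_self (l := literals) (acc := [])]
  have hA := pv_enum_set literals
    (objects.flatMap (fun a => objects.flatMap (fun b =>
        objects.map (fun c => "move-dir(" ++ a ++ "," ++ b ++ "," ++ c ++ ")"))) ++
      objects.map (fun o => "is-nongoal(" ++ o ++ ")") ++
      objects.map (fun o => "clear(" ++ o ++ ")") ++
      objects.map (fun o => "is-stone(" ++ o ++ ")") ++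
      objects.flatMap (fun a => objects.map (fun b => "at(" ++ a ++ "," ++ b ++ ")")) ++
      objects.map (fun o => "is-player(" ++ o ++ ")") ++
      objects.map (fun o => "at-goal(" ++ o ++ ")") ++
      objects.map (fun o => "move(" ++ o ++ ")") ++
      objects.map (fun o => "is-goal(" ++ o ++ ")"))
    0 [] rfl
  simp only [List.nil_append, Nat.cast_zero] at hA
  rw [hA]
  -- B's label loop
  simp only [pv_index_getD]
  rw [pv_lit_fold _ literals (fun _ => 0)]
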